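-- pv_equiv track=rewrite | github.com/ildoivcek/lab7 | lab7.py | get_fi
-- ===== SOURCE A (Python) =====
-- def get_fi(matrix):
--     result = []
--     rows = len(matrix)
--     column = len(matrix[0])
--
--     for j in range(column):
--         mul = 1
--         has_elements = False
--         for i in range(rows):
--             if i > j: #де  i - рядок j - стовпець
--                 mul *= matrix[i][j]
--                 has_elements = True
--
--         if has_elements:
--             result.append(mul)
--     return result
-- ===== SOURCE B (Python) =====
-- def get_fi(matrix):
--     rows = len(matrix)
--     column = len(matrix[0])
--     n = min(column, rows - 1) if rows >= 1 else 0
--     result = [1] * n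
--     for i in range(1, rows):
--         row = matrix[i]
--         for j in range(min(i, n)):
--             result[j] *= row[j]
--     return result
-- ===== Notes on version B (the rewrite author's own statement) =====
-- stated objective: alternative
-- what changed: Replaces A's column-major double loop (for each column, scan ALL rows with an i>j test and a has_elements flag) by a single row-major pass over a preallocated list of ones of length min(column, rows-1), multiplying result[j] by matrix[i][j] only for j < min(i, n), with no per-element comparison or flag bookkeeping.
import Mathlib
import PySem

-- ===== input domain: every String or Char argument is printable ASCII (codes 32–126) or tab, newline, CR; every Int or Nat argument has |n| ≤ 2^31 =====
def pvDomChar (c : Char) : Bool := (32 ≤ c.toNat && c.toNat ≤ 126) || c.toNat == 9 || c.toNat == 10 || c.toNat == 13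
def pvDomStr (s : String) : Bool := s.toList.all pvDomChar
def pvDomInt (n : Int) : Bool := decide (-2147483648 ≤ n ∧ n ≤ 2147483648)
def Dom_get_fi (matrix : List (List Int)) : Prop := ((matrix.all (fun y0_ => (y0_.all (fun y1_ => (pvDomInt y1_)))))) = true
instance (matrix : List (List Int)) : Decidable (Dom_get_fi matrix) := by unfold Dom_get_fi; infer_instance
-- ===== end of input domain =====

-- B replaces A's per-column scan over all rows by a single row-major pass that
-- accumulates every column's sub-diagonal product at once (objective: alternative decomposition).

-- ===== PORT A =====
def get_fi (matrix : List (List Int)) : List Int :=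
  let rows : Int := matrix.length
  let column : Int := (PySem.List.pyGetD matrix 0 []).length
  (PySem.List.pyRange 0 column 1).foldl (fun result j =>
    let st := (PySem.List.pyRange 0 rows 1).foldl
      (fun (p : Int × Bool) i =>
        if j < i then (p.1 * PySem.List.pyGetD (PySem.List.pyGetD matrix i []) j 0, true) else p)
      (1, false)
    if st.2 then result ++ [st.1] else result) []

-- ===== PORT B =====
def get_fi_alt (matrix : List (List Int)) : List Int :=
  let rows : Int := matrix.length
  let column : Int := (PySem.List.pyGetD matrix 0 []).length
  let n : Int := if 1 ≤ rows then min column (rows - 1) else 0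
  let init : List Int := List.replicate n.toNat 1
  (PySem.List.pyRange 1 rows 1).foldl (fun result i =>
    let row := PySem.List.pyGetD matrix i []
    (PySem.List.pyRange 0 (min i n) 1).foldl
      (fun res j => PySem.List.pySetD res j (PySem.List.pyGetD res j 0 * PySem.List.pyGetD row j 0))
      result) init

-- ===== PRECONDITION & SPEC =====
-- Pre_ excludes exactly the inputs on which the Python A raises IndexError: the empty
-- matrix (matrix[0]) and ragged matrices where some accessed entry matrix[i][j]
-- (j < min(i, column)) is missing.  B raises on exactly the same inputs.
def Pre_get_fi (matrix : List (List Int)) : Prop :=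
  matrix ≠ [] ∧ ∀ i < matrix.length,
    min i (matrix.getD 0 []).length ≤ (matrix.getD i []).length
instance (matrix : List (List Int)) : Decidable (Pre_get_fi matrix) := by
  unfold Pre_get_fi; infer_instance
def pvWitness_get_fi : List (List Int) := [[1, 2], [3, 4], [5, 6]]
def Spec_get_fi (matrix : List (List Int)) (out : List Int) : Prop := out = get_fi_alt matrix
instance (matrix : List (List Int)) (out : List Int) : Decidable (Spec_get_fi matrix out) := by unfold Spec_get_fi; infer_instance

-- ===== CLAIM (what is proved, stated in full; the proofs are below) =====
def Claim_equal_get_fi : Prop := ∀ (matrix : List (List Int)), Dom_get_fi matrix → Pre_get_fi matrix → Spec_get_fi matrix (get_fi matrix)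

-- ===== LEMMAS AND PROOFS =====

-- the entry matrix[i][j], totalised with the ports' defaults
def pvG (m : List (List Int)) (i j : Nat) : Int := (m.getD i []).getD j 0

-- product of column j strictly below the diagonal: rows j+1 .. rows-1
def pvP (m : List (List Int)) (rows j : Nat) : Int :=
  (List.range' (j + 1) (rows - (j + 1))).foldl (fun a i => a * pvG m i j) 1

-- common normal form of both ports
def pvSpec (m : List (List Int)) : List Int :=
  (List.range (min (m.getD 0 []).length (m.length - 1))).map (pvP m m.length)

-- A's inner loop leaves the state alone on indices i ≤ k
theorem pvSkip (g : Nat → Int) (k : Nat) (l : List Nat) (p : Int × Bool)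
    (h : ∀ i ∈ l, ¬ k < i) :
    l.foldl (fun p i => if k < i then (p.1 * g i, true) else p) p = p := by
  induction l generalizing p with
  | nil => rfl
  | cons x t ih =>
    simp only [List.foldl_cons]
    rw [if_neg (h x (by simp))]
    exact ih p (fun i hi => h i (by simp [hi]))

-- A's inner loop on indices i > k multiplies them all in and sets the flag
theorem pvMul (g : Nat → Int) (k : Nat) (l : List Nat) (h : ∀ i ∈ l, k < i) :
    ∀ (s : Int) (b : Bool),
    l.foldl (fun p i => if k < i then (p.1 * g i, true) else p) (s, b)
      = (l.foldl (fun a i => a * g i) s, b || !l.isEmpty) := by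
  induction l with
  | nil => intro s b; simp
  | cons x t ih =>
    intro s b
    simp only [List.foldl_cons]
    rw [if_pos (h x (by simp))]
    rw [ih (fun i hi => h i (by simp [hi])) (s * g x) true]
    simp

-- characterisation of A's inner loop
theorem pvInnerA (g : Nat → Int) (rows k : Nat) :
    (List.range rows).foldl (fun p i => if k < i then (p.1 * g i, true) else p) (1, false)
      = ((List.range' (k + 1) (rows - (k + 1))).foldl (fun a i => a * g i) 1,
         decide (k + 1 < rows)) := by
  by_cases h : rows ≤ k + 1
  · rw [pvSkip g k _ _ (by intro i hi; simp only [List.mem_range] at hi; omega)]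
    have h0 : rows - (k + 1) = 0 := by omega
    simp [h0, show ¬ (k + 1 < rows) by omega]
  · have h : k + 1 < rows := by omega
    have hr : List.range rows
        = List.range' 0 (k + 1) ++ List.range' (k + 1) (rows - (k + 1)) := by
      rw [List.range_eq_range', show rows = (k + 1) + (rows - (k + 1)) by omega,
          ← List.range'_append]
      simp
    rw [hr, List.foldl_append,
        pvSkip g k (List.range' 0 (k + 1)) (1, false)
          (by intro i hi; simp only [List.mem_range'_1] at hi; omega),
        pvMul g k (List.range' (k + 1) (rows - (k + 1)))
          (by intro i hi; simp only [List.mem_range'_1] at hi; omega) 1 false]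
    have hne : List.range' (k + 1) (rows - (k + 1)) ≠ [] := by
      simp [List.range'_eq_nil_iff]; omega
    simp [hne, h]

-- characterisation of A's outer loop
theorem pvOuterA (P : Nat → Int) (rows : Nat) (c : Nat) :
    (List.range c).foldl (fun res k => if k + 1 < rows then res ++ [P k] else res) []
      = (List.range (min c (rows - 1))).map P := by
  induction c with
  | zero => simp
  | succ c ih =>
    rw [List.range_succ, List.foldl_append]
    simp only [List.foldl_cons, List.foldl_nil]
    by_cases h : c + 1 < rows
    · rw [if_pos h, ih, show min c (rows - 1) = c by omega,
          show min (c + 1) (rows - 1) = c + 1 by omega, List.range_succ, List.map_append]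
      rfl
    · rw [if_neg h, ih, show min (c + 1) (rows - 1) = min c (rows - 1) by omega]

theorem get_fi_eq_spec : ∀ m, get_fi m = pvSpec m := by
  intro m
  simp only [get_fi, pvSpec, PySem.List.pyGetD_zero, PySem.List.pyRange_zero_natCast,
    List.foldl_map, PySem.List.pyGetD_natCast, Nat.cast_lt]
  simp only [pvInnerA]
  simp only [decide_eq_true_eq]
  rw [pvOuterA (fun k => (List.range' (k + 1) (m.length - (k + 1))).foldl
        (fun a i => a * (m.getD i []).getD k 0) 1) m.length]
  simp [pvP, pvG]

-- B's inner loop, in Nat form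
def pvUpd (row : List Int) (t : Nat) (r : List Int) : List Int :=
  (List.range t).foldl (fun res j => res.set j (res.getD j 0 * row.getD j 0)) r

theorem pvUpd_succ (row : List Int) (t : Nat) (r : List Int) :
    pvUpd row (t + 1) r
      = (pvUpd row t r).set t ((pvUpd row t r).getD t 0 * row.getD t 0) := by
  unfold pvUpd
  rw [List.range_succ, List.foldl_append]
  rfl

theorem pvUpd_length (row : List Int) (t : Nat) (r : List Int) :
    (pvUpd row t r).length = r.length := by
  induction t with
  | zero => rfl
  | succ t ih => rw [pvUpd_succ, List.length_set, ih]

theorem pvUpd_getD (row : List Int) (t : Nat) (r : List Int) (ht : t ≤ r.length) (j : Nat) :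
    (pvUpd row t r).getD j 0
      = if j < t then r.getD j 0 * row.getD j 0 else r.getD j 0 := by
  induction t with
  | zero => simp [pvUpd]
  | succ t ih =>
    have ht' : t ≤ r.length := by omega
    have hl : t < (pvUpd row t r).length := by rw [pvUpd_length]; omega
    rw [pvUpd_succ, List.getD_eq_getElem?_getD, List.getElem?_set]
    by_cases hj : t = j
    · subst hj
      simp only [if_pos hl]
      rw [ih ht']
      simp [show t < t + 1 by omega]
    · rw [if_neg hj, ← List.getD_eq_getElem?_getD, ih ht',
          if_congr (by omega : (j < t) ↔ (j < t + 1)) rfl rfl]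

-- B's row-major invariant: after processing rows 1..K every column j holds
-- the product of its entries in rows j+1..K
theorem pvBinv (m : List (List Int)) (N : Nat) (K : Nat) :
    (List.range K).foldl
        (fun res k => pvUpd (m.getD (1 + k) []) (min (1 + k) N) res)
        (List.replicate N (1 : Int))
      = (List.range N).map
          (fun j => (List.range' (j + 1) (K - j)).foldl (fun a i => a * pvG m i j) 1) := by
  induction K with
  | zero =>
    simp only [List.range_zero, List.foldl_nil, Nat.zero_sub, List.range'_zero,
      List.foldl_nil]
    rw [List.map_const']
    simp
  | succ K ih =>
    rw [List.range_succ, List.foldl_append, List.foldl_cons, List.foldl_nil, ih]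
    have hlen : ((List.range N).map
        (fun j => (List.range' (j + 1) (K - j)).foldl (fun a i => a * pvG m i j) 1)).length
        = N := by simp
    apply List.ext_getElem
    · simp [pvUpd_length]
    · intro j h1 h2
      have hjN : j < N := by simpa [pvUpd_length] using h1
      rw [← List.getD_eq_getElem _ 0 h1, ← List.getD_eq_getElem _ 0 h2]
      rw [pvUpd_getD _ _ _ (by rw [hlen]; exact min_le_right _ _)]
      have hold : ∀ j' (h : j' < N), ((List.range N).map
          (fun j => (List.range' (j + 1) (K - j)).foldl (fun a i => a * pvG m i j) 1)).getD j' 0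
          = (List.range' (j' + 1) (K - j')).foldl (fun a i => a * pvG m i j') 1 := by
        intro j' h
        rw [List.getD_eq_getElem _ 0 (by simpa using h)]
        simp
      have hnew : ((List.range N).map
          (fun j => (List.range' (j + 1) (K + 1 - j)).foldl (fun a i => a * pvG m i j) 1)).getD j 0
          = (List.range' (j + 1) (K + 1 - j)).foldl (fun a i => a * pvG m i j) 1 := by
        rw [List.getD_eq_getElem _ 0 (by simpa using hjN)]
        simp
      rw [hnew, hold j hjN]
      by_cases hjK : j < 1 + K
      · rw [if_pos (by omega : j < min (1 + K) N)]
        rw [show K + 1 - j = (K - j) + 1 by omega, List.range'_concat, List.foldl_append]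
        simp only [List.foldl_cons, List.foldl_nil]
        rw [show j + 1 + 1 * (K - j) = 1 + K by omega]
        rfl
      · rw [if_neg (by omega : ¬ j < min (1 + K) N),
            show K + 1 - j = K - j by omega]

theorem get_fi_alt_eq_spec : ∀ m, get_fi_alt m = pvSpec m := by
  intro m
  cases m with
  | nil => decide
  | cons r0 tl =>
    simp only [get_fi_alt, pvSpec, PySem.List.pyGetD_zero]
    have hrows : ((r0 :: tl).length : Int) = (tl.length : Int) + 1 := by
      simp
    have h1le : (1 : Int) ≤ ((r0 :: tl).length : Int) := by rw [hrows]; omega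
    rw [if_pos h1le]
    have hn : min ((((r0 :: tl).getD 0 []).length : Nat) : Int)
          (((r0 :: tl).length : Int) - 1)
        = ((min ((r0 :: tl).getD 0 []).length tl.length : Nat) : Int) := by
      rw [hrows]; push_cast; omega
    rw [hn]
    set N := min ((r0 :: tl).getD 0 []).length tl.length with hN
    rw [PySem.List.pyRange_one 1 ((r0 :: tl).length : Int),
        show (((r0 :: tl).length : Int) - 1).toNat = tl.length by
          rw [hrows]; omega,
        List.foldl_map]
    simp only [Int.toNat_natCast]
    have hcast : ∀ k : Nat, (1 : Int) + (k : Int) = ((1 + k : Nat) : Int) := by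
      intro k; push_cast; ring
    simp only [hcast]
    have hmin : ∀ k : Nat, min (((1 + k : Nat) : Int)) ((N : Nat) : Int)
        = ((min (1 + k) N : Nat) : Int) := by
      intro k; push_cast; rfl
    simp only [hmin, PySem.List.pyRange_zero_natCast, List.foldl_map,
      PySem.List.pySetD_natCast, PySem.List.pyGetD_natCast]
    have := pvBinv (r0 :: tl) N tl.length
    simp only [pvUpd] at this
    rw [this]
    apply List.map_congr_left
    intro j hj
    simp only [pvP, show (r0 :: tl).length - (j + 1) = tl.length - j by simp]

-- ===== VERDICT (by name: the statement is the Claim_ definition above) =====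
theorem get_fi_spec : Claim_equal_get_fi := by
  intro m _ _
  unfold Spec_get_fi
  rw [get_fi_eq_spec, get_fi_alt_eq_spec]
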